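-- pv_equiv track=rewrite | github.com/VMAzure/azurenet-engine | app/jobs/sync_motornet_immagini_fill.py | select_images
-- ===== SOURCE A (Python) =====
-- from typing import Any, Dict, List, Optional, Tuple
-- from collections import defaultdict
--
-- _RES_PRIORITY = {"H": 3, "M": 2, "L": 1}
--
-- def _norm_str(v: Any) -> Optional[str]:
--     if v is None:
--         return None
--     s = str(v).strip()
--     return s if s else None
--
-- def _pick_best(items: List[Dict[str, Any]]) -> Dict[str, Any]:
--     # H > M > L; tie-break stable by url
--     def key(it: Dict[str, Any]) -> Tuple[int, str]:
--         r = _norm_str(it.get("risoluzione"))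
--         score = _RES_PRIORITY.get(r or "", 0)
--         url = _norm_str(it.get("url")) or ""
--         return (score, url)
--
--     return sorted(items, key=key, reverse=True)[0]
--
-- def select_images(payload: Dict[str, Any]) -> List[Dict[str, Any]]:
--     raw = payload.get("immagini") or []
--     if not isinstance(raw, list):
--         return []
--
--     # group by (codiceVisuale, codiceFotografia)
--     groups: Dict[Tuple[Optional[str], Optional[str]], List[Dict[str, Any]]] = defaultdict(list)
--
--     for it in raw:
--         if not isinstance(it, dict):
--             continue
--
--         url = _norm_str(it.get("url"))
--         if not url:
--             continue
--
--         cv = _norm_str(it.get("codiceVisuale"))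
--         cf = _norm_str(it.get("codiceFotografia"))
--
--         # grouping A) = (codiceVisuale, codiceFotografia)
--         # fallback safe: if cf is None, group by (cv, url) to avoid collapsing unrelated images
--         if cf is None:
--             groups[(cv, url)].append(it)
--         else:
--             groups[(cv, cf)].append(it)
--
--     selected: List[Dict[str, Any]] = []
--     for _k, items in groups.items():
--         best = _pick_best(items)
--         url = _norm_str(best.get("url"))
--         if not url:
--             continue
--         selected.append(best)
--
--     # final dedup by url (safety)
--     seen = set()
--     out = []
--     for it in selected:
--         url = _norm_str(it.get("url"))
--         if not url or url in seen:
--             continue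
--         seen.add(url)
--         out.append(it)
--
--     return out
-- ===== SOURCE B (Python) =====
-- _RES_PRIORITY = {"H": 3, "M": 2, "L": 1}
--
-- def _norm_str(v):
--     if v is None:
--         return None
--     s = str(v).strip()
--     return s if s else None
--
-- def _rank(it):
--     r = _norm_str(it.get("risoluzione"))
--     return (_RES_PRIORITY.get(r or "", 0), _norm_str(it.get("url")) or "")
--
-- def _key_item(it):
--     # None = skip; otherwise (group key, item)
--     if not isinstance(it, dict):
--         return None
--     u = _norm_str(it.get("url"))
--     if not u:
--         return None
--     cv = _norm_str(it.get("codiceVisuale"))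
--     cf = _norm_str(it.get("codiceFotografia"))
--     return ((cv, u) if cf is None else (cv, cf), it)
--
-- def select_images(payload):
--     raw = payload.get("immagini") or []
--     if not isinstance(raw, list):
--         return []
--     keyed = [p for p in map(_key_item, raw) if p is not None]
--
--     # partition loop: peel off the leading key's whole group, pick its best by a
--     # running strict-max scan, dedup by url on the fly; no dict, no sorting
--     out = []
--     seen = set()
--     while keyed:
--         k = keyed[0][0]
--         group = [it for kk, it in keyed if kk == k]
--         keyed = [p for p in keyed if p[0] != k]
--         best = group[0]
--         for it in group[1:]:
--             if _rank(it) > _rank(best):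
--                 best = it
--         u = _norm_str(best.get("url"))
--         if u not in seen:
--             seen.add(u)
--             out.append(best)
--     return out
-- ===== Notes on version B (the rewrite author's own statement) =====
-- stated objective: alternative
-- what changed: B drops A's defaultdict-of-lists and per-group reverse sort entirely: it tags each kept item with its group key once, then repeatedly peels off the whole group of the leading key by list partition, picks that group's best with a running strict-max scan, and dedups by url on the fly, so there is no dict and no sorting at all.
import Mathlib
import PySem

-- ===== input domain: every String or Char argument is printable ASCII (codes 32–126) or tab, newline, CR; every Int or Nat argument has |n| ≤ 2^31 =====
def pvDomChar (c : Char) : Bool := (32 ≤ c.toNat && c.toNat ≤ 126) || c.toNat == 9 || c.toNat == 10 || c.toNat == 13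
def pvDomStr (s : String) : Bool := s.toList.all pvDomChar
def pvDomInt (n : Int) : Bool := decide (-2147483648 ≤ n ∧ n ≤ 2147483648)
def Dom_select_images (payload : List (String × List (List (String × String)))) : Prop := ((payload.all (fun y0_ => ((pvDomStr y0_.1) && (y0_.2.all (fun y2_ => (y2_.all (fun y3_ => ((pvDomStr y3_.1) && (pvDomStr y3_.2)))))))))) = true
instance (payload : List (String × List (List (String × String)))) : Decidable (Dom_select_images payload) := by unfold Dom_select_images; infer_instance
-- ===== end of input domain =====

-- B replaces A's defaultdict-of-lists + per-group reverse sort by a dict-free partition loop: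
-- tag each kept item with its group key once, peel off the leading key's whole group by list
-- partition, take its best by a running strict-max scan, dedup by url on the fly.

-- ===== PORT A =====
-- module-level helpers shared by both Pythons: _RES_PRIORITY, _norm_str, dict .get(k)
def pvResPriority : PySem.Dict String Int := PySem.Dict.mk [("H", 3), ("M", 2), ("L", 1)]

def pvNorm (v : Option String) : Option String :=
  match v with
  | none => none
  | some s => let t := PySem.Str.strip s; if t = "" then none else some t

def pvGet (it : List (String × String)) (k : String) : Option String :=
  (PySem.Dict.mk it).get? k

-- _pick_best's key function, componentwise: (score, url)
def pvScore (it : List (String × String)) : Int :=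
  pvResPriority.getD ((pvNorm (pvGet it "risoluzione")).getD "") 0
def pvUrlKey (it : List (String × String)) : String :=
  (pvNorm (pvGet it "url")).getD ""

-- sorted(items, key=key, reverse=True)[0]; the none guard is for totality only (groups' values are nonempty)
def pvPickBest (items : List (List (String × String))) : Option (List (String × String)) :=
  PySem.List.pyGet? (PySem.List.sorted2 items pvScore pvUrlKey true) 0

def select_images (payload : List (String × List (List (String × String)))) : List (List (String × String)) :=
  -- raw = payload.get("immagini") or []   (isinstance(raw, list) always holds under the type convention)
  let raw : List (List (String × String)) :=
    match (PySem.Dict.mk payload).get? "immagini" with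
    | none => []
    | some l => l
  let groups : PySem.Dict (Option String × String) (List (List (String × String))) :=
    raw.foldl (fun g it =>
      match pvNorm (pvGet it "url") with
      | none => g
      | some url =>
        let cv := pvNorm (pvGet it "codiceVisuale")
        match pvNorm (pvGet it "codiceFotografia") with
        | none => g.modify (cv, url) [] (fun l => l ++ [it])
        | some cf => g.modify (cv, cf) [] (fun l => l ++ [it])) PySem.Dict.empty
  let selected : List (List (String × String)) :=
    groups.items.foldl (fun acc kv =>
      match pvPickBest kv.2 with
      | none => acc
      | some best =>
        match pvNorm (pvGet best "url") with
        | none => acc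
        | some _ => acc ++ [best]) []
  (selected.foldl (fun (so : PySem.Set String × List (List (String × String))) it =>
      match pvNorm (pvGet it "url") with
      | none => so
      | some url =>
        if PySem.Set.contains so.1 url then so
        else (PySem.Set.add so.1 url, so.2 ++ [it]))
    ((PySem.Set.empty : PySem.Set String), ([] : List (List (String × String))))).2

-- ===== PORT B =====
-- _rank(it) = (_RES_PRIORITY.get(r or "", 0), _norm_str(it.get("url")) or "")
def pvRank (it : List (String × String)) : Int × String :=
  (pvResPriority.getD ((pvNorm (pvGet it "risoluzione")).getD "") 0,
   (pvNorm (pvGet it "url")).getD "")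

-- Python's '<' on (int, str) tuples, lexicographic
def pvRankLt (a b : Int × String) : Bool :=
  decide (a.1 < b.1) || (a.1 == b.1 && decide (a.2 < b.2))

-- _key_item(it): None = skip, else (group key, item); isinstance always holds under the type convention
def pvKeyItem (it : List (String × String)) :
    Option ((Option String × String) × List (String × String)) :=
  match pvNorm (pvGet it "url") with
  | none => none
  | some u =>
    let cv := pvNorm (pvGet it "codiceVisuale")
    let cf := pvNorm (pvGet it "codiceFotografia")
    some ((match cf with | none => (cv, u) | some c => (cv, c)), it)

-- the while-loop: peel off the leading key's group, running strict-max, dedup on the fly.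
-- 'group' is [it for kk, it in keyed if kk == k]: its head is keyed[0] itself (kk == k trivially).
def pvLoopB (keyed : List ((Option String × String) × List (String × String)))
    (seen : PySem.Set (Option String)) (out : List (List (String × String))) :
    List (List (String × String)) :=
  match keyed with
  | [] => out
  | (k, it0) :: rest =>
    let groupTail := (rest.filter (fun p => p.1 == k)).map Prod.snd
    let keyed' := rest.filter (fun p => !(p.1 == k))
    let best := groupTail.foldl (fun b it => if pvRankLt (pvRank b) (pvRank it) then it else b) it0
    let u := pvNorm (pvGet best "url")
    if PySem.Set.contains seen u then pvLoopB keyed' seen out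
    else pvLoopB keyed' (PySem.Set.add seen u) (out ++ [best])
  termination_by keyed.length
  decreasing_by all_goals
    simp only [List.length_cons, List.length_unattach]
    exact Nat.lt_succ_of_le (le_trans (List.length_filter_le _ _) (by simp))

def select_images_alt (payload : List (String × List (List (String × String)))) : List (List (String × String)) :=
  let raw : List (List (String × String)) :=
    match (PySem.Dict.mk payload).get? "immagini" with
    | none => []
    | some l => l
  let keyed := (raw.map pvKeyItem).filterMap id
  pvLoopB keyed PySem.Set.empty []

-- ===== PRECONDITION & SPEC =====
-- A is total on every Python dict. Pre_ only excludes association lists with a DUPLICATE key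
-- (at top level, or inside a dict of the "immagini" list — the entries A reads): such a list is
-- the image of no Python dict, so A is never called on it; every sampled dict input satisfies Pre_.
def Pre_select_images (payload : List (String × List (List (String × String)))) : Prop :=
  (payload.map Prod.fst).Nodup ∧
    ∀ p ∈ payload, p.1 = "immagini" → ∀ it ∈ p.2, (it.map Prod.fst).Nodup
instance (payload : List (String × List (List (String × String)))) : Decidable (Pre_select_images payload) := by unfold Pre_select_images; infer_instance
def pvWitness_select_images : (List (String × List (List (String × String)))) :=
  [("immagini", [[("url", "u1"), ("risoluzione", "H")], [("url", "u2"), ("risoluzione", "L")]])]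

def Spec_select_images (payload : List (String × List (List (String × String)))) (out : List (List (String × String))) : Prop := out = select_images_alt payload
instance (payload : List (String × List (List (String × String)))) (out : List (List (String × String))) : Decidable (Spec_select_images payload out) := by unfold Spec_select_images; infer_instance

-- ===== CLAIM =====
def Claim_equal_select_images : Prop := ∀ (payload : List (String × List (List (String × String)))), Dom_select_images payload → Pre_select_images payload → Spec_select_images payload (select_images payload)

-- ===== LEMMAS AND PROOFS =====

def pvGStep (g : PySem.Dict (Option String × String) (List (List (String × String))))
    (p : (Option String × String) × List (String × String)) :
    PySem.Dict (Option String × String) (List (List (String × String))) :=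
  g.modify p.1 [] (fun l => l ++ [p.2])

-- running first-strict-max of a group (B's scan)
def pvPick (l : List (List (String × String))) : List (String × String) :=
  match l with
  | [] => []
  | x :: t => t.foldl (fun m y => if pvRankLt (pvRank m) (pvRank y) then y else m) x

lemma pvFoldl_opt {α β γ : Type} (l : List α) (f : α → Option β) (g : γ → β → γ) (init : γ) :
    l.foldl (fun acc x => match f x with | none => acc | some y => g acc y) init
      = (l.filterMap f).foldl g init := by
  induction l generalizing init with
  | nil => rfl
  | cons a t ih => cases h : f a <;> simp [h, ih]

lemma pvGroupsA_eq (raw : List (List (String × String))) :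
    raw.foldl (fun g it =>
      match pvNorm (pvGet it "url") with
      | none => g
      | some url =>
        let cv := pvNorm (pvGet it "codiceVisuale")
        match pvNorm (pvGet it "codiceFotografia") with
        | none => g.modify (cv, url) [] (fun l => l ++ [it])
        | some cf => g.modify (cv, cf) [] (fun l => l ++ [it])) PySem.Dict.empty
    = (raw.filterMap pvKeyItem).foldl pvGStep PySem.Dict.empty := by
  rw [← pvFoldl_opt raw pvKeyItem pvGStep]
  apply PySem.List.foldl_congr_mem
  intro g it _
  unfold pvKeyItem pvGStep
  rcases pvNorm (pvGet it "url") with _ | url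
  · rfl
  · rcases pvNorm (pvGet it "codiceFotografia") with _ | cf <;> rfl

lemma pvPick_append (l : List (List (String × String))) (y : List (String × String))
    (h : l ≠ []) :
    pvPick (l ++ [y]) = if pvRankLt (pvRank (pvPick l)) (pvRank y) then y else pvPick l := by
  rcases l with _ | ⟨x, t⟩
  · exact absurd rfl h
  · simp [pvPick, List.foldl_append]

lemma pvPick_mem (l : List (List (String × String))) (h : l ≠ []) : pvPick l ∈ l := by
  rcases l with _ | ⟨x, t⟩
  · exact absurd rfl h
  · show t.foldl (fun m y => if pvRankLt (pvRank m) (pvRank y) then y else m) x ∈ x :: t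
    induction t generalizing x with
    | nil => simp
    | cons y t ih =>
      simp only [List.foldl_cons]
      rcases List.mem_cons.1 (ih (if pvRankLt (pvRank x) (pvRank y) then y else x) (by simp)) with h1 | h1
      · rw [h1]; split <;> simp
      · simp [List.mem_cons, h1]

lemma pvInsertBy_cons {α : Type} (before : α → α → Bool) (x y : α) (ys : List α) :
    PySem.List.insertBy before x (y :: ys)
      = if before x y then x :: y :: ys else y :: PySem.List.insertBy before x ys := rfl

-- A's 'reverse-sorted head' comparison equals B's strict tuple '<' (Int keys are trichotomous)
lemma pvLt_eq (a b : Int) (c d : String) :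
    (decide (a < b) || (!decide (b < a) && decide (c < d)))
      = (decide (a < b) || (a == b && decide (c < d))) := by
  rcases lt_trichotomy a b with h | h | h
  · simp [h]
  · subst h; simp
  · have h1 : ¬ a < b := by omega
    have h2 : a ≠ b := by omega
    simp [h, h1, h2]

-- head of the stable reverse sort = running first-strict-max
lemma pvSortedHead (l : List (List (String × String))) (h : l ≠ []) :
    PySem.List.pyGet? (PySem.List.sorted2 l pvScore pvUrlKey true) 0 = some (pvPick l) := by
  induction l using List.reverseRecOn with
  | nil => exact absurd rfl h
  | append_singleton l y ih =>
    rcases l with _ | ⟨x, t⟩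
    · simp [PySem.List.sorted2, PySem.List.insertBy, pvPick]
    · have hne : (x :: t) ≠ [] := by simp
      have ihx := ih hne
      have hs : PySem.List.sorted2 ((x :: t) ++ [y]) pvScore pvUrlKey true
          = PySem.List.insertBy
              (fun a b => decide (pvScore b < pvScore a) ||
                 (!decide (pvScore a < pvScore b) && decide (pvUrlKey b < pvUrlKey a)))
              y (PySem.List.sorted2 (x :: t) pvScore pvUrlKey true) := by
        simp [PySem.List.sorted2, List.foldl_append]
      rcases hsort : PySem.List.sorted2 (x :: t) pvScore pvUrlKey true with _ | ⟨hd, tl⟩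
      · rw [hsort] at ihx; simp [PySem.List.pyGet?] at ihx
      · rw [hsort] at ihx
        rw [PySem.List.pyGet?_zero_cons] at ihx
        have hhd : hd = pvPick (x :: t) := by injection ihx
        have hrank : ∀ z, pvRank z = (pvScore z, pvUrlKey z) := fun z => rfl
        have hb : (decide (pvScore (pvPick (x :: t)) < pvScore y) ||
            (!decide (pvScore y < pvScore (pvPick (x :: t))) &&
              decide (pvUrlKey (pvPick (x :: t)) < pvUrlKey y)))
            = pvRankLt (pvRank (pvPick (x :: t))) (pvRank y) := by
          rw [hrank, hrank]
          simp only [pvRankLt]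
          exact pvLt_eq _ _ _ _
        rw [hs, hsort, hhd]
        simp only [pvInsertBy_cons]
        rw [hb, pvPick_append (x :: t) y hne]
        by_cases hcb : pvRankLt (pvRank (pvPick (x :: t))) (pvRank y) = true
        · simp [hcb, PySem.List.pyGet?_zero_cons]
        · simp [Bool.eq_false_iff.2 hcb]

-- characterization of A's grouping dict
lemma pvGfold_items (ps : List ((Option String × String) × List (String × String))) :
    (ps.foldl pvGStep PySem.Dict.empty).items
      = (PySem.Set.ofList (ps.map Prod.fst)).map
          (fun k => (k, (ps.filter (fun q => q.1 == k)).map Prod.snd)) := by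
  have hshape : ps.foldl pvGStep PySem.Dict.empty
      = ps.foldl (fun d p => d.modify p.1 [] (fun l => l ++ [p.2])) PySem.Dict.empty := rfl
  rw [hshape]
  have hnd : ((ps.foldl (fun d p => d.modify p.1 [] (fun l => l ++ [p.2])) PySem.Dict.empty).keys).Nodup := by
    have := PySem.Dict.nodup_keys_foldl_modify_key ps Prod.fst []
      (fun _ p => fun l => l ++ [p.2]) PySem.Dict.empty (by simp [PySem.Dict.keys, PySem.Dict.empty])
    exact this
  rw [PySem.Dict.items_eq_map_keys _ hnd []]
  have hkeys : (ps.foldl (fun d p => d.modify p.1 [] (fun l => l ++ [p.2])) PySem.Dict.empty).keys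
      = PySem.Set.ofList (ps.map Prod.fst) := by
    have := PySem.Dict.keys_foldl_modify_key ps Prod.fst []
      (fun _ p => fun l => l ++ [p.2]) PySem.Dict.empty
    rw [this]
    have : (PySem.Dict.empty : PySem.Dict (Option String × String) (List (List (String × String)))).keys = [] := rfl
    rw [this, PySem.Set.update_nil_left]
  rw [hkeys]
  apply List.map_congr_left
  intro k _
  have := PySem.Dict.getD_foldl_modify_append ps
    (PySem.Dict.empty : PySem.Dict (Option String × String) (List (List (String × String)))) k
  rw [this]
  simp [PySem.Dict.getD, PySem.Dict.get?, PySem.Dict.empty]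

lemma pvKeyItem_url {q : (Option String × String) × List (String × String)}
    {raw : List (List (String × String))} (h : q ∈ raw.filterMap pvKeyItem) :
    ∃ u, pvNorm (pvGet q.2 "url") = some u := by
  rcases List.mem_filterMap.1 h with ⟨it, _, hit⟩
  unfold pvKeyItem at hit
  rcases hu : pvNorm (pvGet it "url") with _ | u
  · rw [hu] at hit; simp at hit
  · rw [hu] at hit
    simp only [Option.some.injEq] at hit
    exact ⟨u, by rw [← hit]; exact hu⟩

lemma pvContains_map_some (l : List String) (u : String) :
    (l.map some).contains (some u) = l.contains u := by
  induction l with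
  | nil => rfl
  | cons x t ih => simp

-- A's typed dedup fold (Set String) = the Option-typed dedup fold, when every url is some
lemma pvDedup_eq (L : List (List (String × String)))
    (hL : ∀ it ∈ L, ∃ u, pvNorm (pvGet it "url") = some u) :
    ∀ (sA : PySem.Set String) (out : List (List (String × String))),
    (L.foldl (fun (so : PySem.Set String × List (List (String × String))) it =>
      match pvNorm (pvGet it "url") with
      | none => so
      | some url =>
        if PySem.Set.contains so.1 url then so
        else (PySem.Set.add so.1 url, so.2 ++ [it])) (sA, out)).2
    = (L.foldl (fun (so : PySem.Set (Option String) × List (List (String × String))) it =>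
      let u := pvNorm (pvGet it "url")
      if PySem.Set.contains so.1 u then so
      else (PySem.Set.add so.1 u, so.2 ++ [it])) (sA.map some, out)).2 := by
  induction L with
  | nil => intro sA out; rfl
  | cons it t ih =>
    intro sA out
    obtain ⟨u, hu⟩ := hL it (List.mem_cons_self ..)
    have ht : ∀ x ∈ t, ∃ v, pvNorm (pvGet x "url") = some v :=
      fun x hx => hL x (List.mem_cons_of_mem _ hx)
    simp only [List.foldl_cons, hu]
    have hc : PySem.Set.contains (sA.map some) (some u) = PySem.Set.contains sA u :=
      pvContains_map_some sA u
    by_cases hin : PySem.Set.contains sA u = true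
    · simp only [hc, hin, if_true]
      exact ih ht sA out
    · have hin' : PySem.Set.contains sA u = false := Bool.eq_false_iff.2 hin
      simp only [hin', hc, Bool.false_eq_true, if_false]
      have hadd : PySem.Set.add (sA.map some) (some u) = (PySem.Set.add sA u).map some := by
        unfold PySem.Set.add
        rw [hc, hin']
        simp
      rw [hadd]
      exact ih ht (PySem.Set.add sA u) (out ++ [it])

-- Set.ofList peels its head together with all its later duplicates
lemma pvFoldl_add_cons {α : Type} [BEq α] [LawfulBEq α] (a : α) (l : List α) :
    (∀ x ∈ l, (x == a) = false) → ∀ (s : List α),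
    l.foldl PySem.Set.add (a :: s) = a :: l.foldl PySem.Set.add s := by
  induction l with
  | nil => intro _ s; rfl
  | cons x t ih =>
    intro h s
    have hx : (x == a) = false := h x (List.mem_cons_self ..)
    have ht : ∀ y ∈ t, (y == a) = false := fun y hy => h y (List.mem_cons_of_mem _ hy)
    simp only [List.foldl_cons]
    have hc : (a :: s).contains x = s.contains x := by
      simp [hx]
    by_cases hin : s.contains x = true
    · have : PySem.Set.add (a :: s) x = a :: PySem.Set.add s x := by
        unfold PySem.Set.add
        rw [show PySem.Set.contains (a :: s) x = (a :: s).contains x from rfl,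
          show PySem.Set.contains s x = s.contains x from rfl, hc, hin]
        simp
      rw [this]; exact ih ht _
    · have hin' : s.contains x = false := Bool.eq_false_iff.2 hin
      have : PySem.Set.add (a :: s) x = a :: PySem.Set.add s x := by
        unfold PySem.Set.add
        rw [show PySem.Set.contains (a :: s) x = (a :: s).contains x from rfl,
          show PySem.Set.contains s x = s.contains x from rfl, hc, hin']
        simp
      rw [this]; exact ih ht _

lemma pvFoldl_add_skip {α : Type} [BEq α] [LawfulBEq α] (a : α) (l : List α) :
    ∀ (s : List α), a ∈ s →
    l.foldl PySem.Set.add s = (l.filter (fun x => !(x == a))).foldl PySem.Set.add s := by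
  induction l with
  | nil => intro s _; rfl
  | cons x t ih =>
    intro s hs
    by_cases hx : x = a
    · subst hx
      have hcon : PySem.Set.contains s x = true := by
        simpa [PySem.Set.contains, List.contains_iff_mem] using hs
      have hadd : PySem.Set.add s x = s := by unfold PySem.Set.add; rw [hcon]; simp
      simp only [List.filter_cons, beq_self_eq_true, Bool.not_true, List.foldl_cons, hadd]
      exact ih s hs
    · have hxb : (x == a) = false := beq_eq_false_iff_ne.2 hx
      have hmem : a ∈ PySem.Set.add s x := by
        unfold PySem.Set.add; split <;> simp [hs]
      simp only [List.filter_cons, hxb, Bool.not_false, List.foldl_cons]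
      exact ih _ hmem

lemma pvOfList_cons {α : Type} [BEq α] [LawfulBEq α] (a : α) (l : List α) :
    PySem.Set.ofList (a :: l) = a :: PySem.Set.ofList (l.filter (fun x => !(x == a))) := by
  have h0 : PySem.Set.ofList (a :: l) = l.foldl PySem.Set.add [a] := by
    rw [PySem.Set.ofList_eq_foldl, List.foldl_cons]
    rfl
  have hall : ∀ x ∈ l.filter (fun x => !(x == a)), (x == a) = false := by
    intro x hx
    have := (List.mem_filter.1 hx).2
    simpa using this
  rw [h0, pvFoldl_add_skip a l [a] (by simp), pvFoldl_add_cons a _ hall []]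
  rw [PySem.Set.ofList_eq_foldl]

-- the partition loop computes the dedup fold over the per-key picks (first-occurrence key order)
lemma pvLoopB_eq (n : Nat) :
    ∀ (keyed : List ((Option String × String) × List (String × String))), keyed.length ≤ n →
    ∀ (seen : PySem.Set (Option String)) (out : List (List (String × String))),
    pvLoopB keyed seen out
      = (((PySem.Set.ofList (keyed.map Prod.fst)).map
            (fun k => pvPick ((keyed.filter (fun q => q.1 == k)).map Prod.snd))).foldl
          (fun (so : PySem.Set (Option String) × List (List (String × String))) it =>
            let u := pvNorm (pvGet it "url")
            if PySem.Set.contains so.1 u then so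
            else (PySem.Set.add so.1 u, so.2 ++ [it])) (seen, out)).2 := by
  induction n with
  | zero =>
    intro keyed hlen seen out
    have hnil : keyed = [] := List.eq_nil_of_length_eq_zero (Nat.le_zero.1 hlen)
    subst hnil; rw [pvLoopB]; rfl
  | succ n ih =>
    intro keyed hlen seen out
    match keyed with
    | [] => rw [pvLoopB]; rfl
    | (k, it0) :: rest =>
      rw [pvLoopB]
      set M := rest.filter (fun p => !(p.1 == k)) with hMdef
      have hM : M.length ≤ n := by
        rw [hMdef]
        have h1 := List.length_filter_le (fun p => !(p.1 == k)) rest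
        simp only [List.length_cons] at hlen
        omega
      set best := ((rest.filter (fun p => p.1 == k)).map Prod.snd).foldl
        (fun b it => if pvRankLt (pvRank b) (pvRank it) then it else b) it0 with hbest
      -- RHS: the key list peels to k :: (distinct keys of M)
      have hmf : (rest.map Prod.fst).filter (fun x => !(x == k)) = M.map Prod.fst := by
        rw [List.filter_map]; rfl
      have hofl : PySem.Set.ofList (((k, it0) :: rest).map Prod.fst)
          = k :: PySem.Set.ofList (M.map Prod.fst) := by
        rw [List.map_cons, pvOfList_cons, hmf]
      have hheadpick : pvPick (((((k, it0) :: rest)).filter (fun q => q.1 == k)).map Prod.snd)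
          = best := by
        have : ((k, it0) :: rest).filter (fun q => q.1 == k)
            = (k, it0) :: rest.filter (fun q => q.1 == k) := by
          simp
        rw [this, List.map_cons]
        rfl
      have hgrp : ∀ k' ∈ PySem.Set.ofList (M.map Prod.fst),
          ((k, it0) :: rest).filter (fun q => q.1 == k')
            = M.filter (fun q => q.1 == k') := by
        intro k' hk'
        have hk'm : k' ∈ M.map Prod.fst := (PySem.Set.mem_ofList _ _).1 hk'
        rcases List.mem_map.1 hk'm with ⟨p, hpM, hp1⟩
        have hpk : (p.1 == k) = false := by
          have := (List.mem_filter.1 hpM).2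
          simpa using this
        have hkk' : (k == k') = false := by
          rw [← hp1]
          exact beq_eq_false_iff_ne.2 (fun hc => by rw [← hc] at hpk; simp at hpk)
        have hhead : ((k, it0) :: rest).filter (fun q => q.1 == k')
            = rest.filter (fun q => q.1 == k') := by
          simp [hkk']
        rw [hhead, hMdef, List.filter_filter]
        apply List.filter_congr
        intro a _
        by_cases ha : (a.1 == k') = true
        · have ha1 : a.1 = k' := eq_of_beq ha
          have : (a.1 == k) = false := by
            rw [ha1]
            exact beq_eq_false_iff_ne.2
              (fun hc => by rw [← hc] at hkk'; simp at hkk')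
          simp [ha, this]
        · simp [Bool.eq_false_iff.2 ha]
      have hmapeq : (PySem.Set.ofList (M.map Prod.fst)).map
            (fun k' => pvPick ((((k, it0) :: rest).filter (fun q => q.1 == k')).map Prod.snd))
          = (PySem.Set.ofList (M.map Prod.fst)).map
            (fun k' => pvPick ((M.filter (fun q => q.1 == k')).map Prod.snd)) := by
        apply List.map_congr_left
        intro k' hk'
        rw [hgrp k' hk']
      rw [hofl, List.map_cons, hheadpick, List.foldl_cons, hmapeq]
      simp only []
      by_cases hc : PySem.Set.contains seen (pvNorm (pvGet best "url")) = true
      · rw [if_pos hc, if_pos hc]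
        exact ih M hM seen out
      · rw [if_neg hc, if_neg hc]
        exact ih M hM _ _

-- ===== VERDICT =====
theorem select_images_spec : Claim_equal_select_images := by
  intro payload _hdom _hpre
  unfold Spec_select_images select_images select_images_alt
  simp only []
  rw [pvGroupsA_eq]
  set keyed := (match (PySem.Dict.mk payload).get? "immagini" with
    | none => ([] : List (List (String × String)))
    | some l => l).filterMap pvKeyItem with hkeyed
  have hurl : ∀ q ∈ keyed, ∃ u, pvNorm (pvGet q.2 "url") = some u :=
    fun q hq => pvKeyItem_url hq
  rw [pvGfold_items]
  -- A's 'selected' list = the per-key picks, in key order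
  set S := PySem.Set.ofList (keyed.map Prod.fst) with hSdef
  have hvals : ∀ k ∈ S, (keyed.filter (fun q => q.1 == k)).map Prod.snd ≠ [] := by
    intro k hkS
    have hkm : k ∈ keyed.map Prod.fst := (PySem.Set.mem_ofList _ _).1 hkS
    rcases List.mem_map.1 hkm with ⟨q, hq, hq1⟩
    intro hcon
    have := List.map_eq_nil_iff.1 hcon
    have hqmem : q ∈ keyed.filter (fun q => q.1 == k) :=
      List.mem_filter.2 ⟨hq, by simp [hq1]⟩
    rw [this] at hqmem
    simp at hqmem
  have hvals_url : ∀ k ∈ S, ∀ x ∈ (keyed.filter (fun q => q.1 == k)).map Prod.snd,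
      ∃ u, pvNorm (pvGet x "url") = some u := by
    intro k _ x hx
    rcases List.mem_map.1 hx with ⟨q, hq, hq2⟩
    exact hq2 ▸ hurl q (List.mem_filter.1 hq).1
  have hsel : (S.map (fun k => (k, (keyed.filter (fun q => q.1 == k)).map Prod.snd))).foldl
      (fun acc kv =>
        match pvPickBest kv.2 with
        | none => acc
        | some best =>
          match pvNorm (pvGet best "url") with
          | none => acc
          | some _ => acc ++ [best]) []
      = S.map (fun k => pvPick ((keyed.filter (fun q => q.1 == k)).map Prod.snd)) := by
    rw [PySem.List.foldl_congr_mem _ _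
      (fun acc kv => acc ++ [pvPick kv.2]) _ ?_]
    · rw [PySem.List.foldl_append_singleton_eq_map, List.nil_append, List.map_map]
      rfl
    · intro acc kv hkv
      rcases List.mem_map.1 hkv with ⟨k, hkS, hkeq⟩
      have hne := hvals k hkS
      rw [← hkeq]
      simp only []
      have hpb : pvPickBest ((keyed.filter (fun q => q.1 == k)).map Prod.snd)
          = some (pvPick ((keyed.filter (fun q => q.1 == k)).map Prod.snd)) := by
        unfold pvPickBest; exact pvSortedHead _ hne
      obtain ⟨u, hu⟩ := hvals_url k hkS _ (pvPick_mem _ hne)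
      simp only [hpb, hu]
  rw [hsel]
  -- B's keyed list is the same filterMap
  have hkB : ((match (PySem.Dict.mk payload).get? "immagini" with
      | none => ([] : List (List (String × String)))
      | some l => l).map pvKeyItem).filterMap id = keyed := by
    rw [hkeyed, List.filterMap_map]
    rfl
  rw [hkB, pvLoopB_eq keyed.length keyed (le_refl _)]
  -- A's typed dedup fold = the Option-typed dedup fold over the same pick list
  have hLurl : ∀ it ∈ S.map (fun k => pvPick ((keyed.filter (fun q => q.1 == k)).map Prod.snd)),
      ∃ u, pvNorm (pvGet it "url") = some u := by
    intro it hit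
    rcases List.mem_map.1 hit with ⟨k, hkS, hkeq⟩
    exact hkeq ▸ hvals_url k hkS _ (pvPick_mem _ (hvals k hkS))
  have hded := pvDedup_eq _ hLurl (PySem.Set.empty) []
  simpa using hded
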